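-- pv_equiv track=rewrite | github.com/mathanmichaelraj-byte/emotional_analyser | train_with_dataset.py | map_to_behavioral_state
-- ===== SOURCE A (Python) =====
-- emotion_mapping = {
--     'calm': ['relief', 'approval', 'realization', 'optimism', 'caring', 'gratitude'],
--     'restless': ['nervousness', 'confusion', 'curiosity', 'surprise'],
--     'stressed': ['fear', 'nervousness', 'annoyance', 'disappointment'],
--     'low_energy': ['sadness', 'grief', 'disappointment', 'embarrassment'],
--     'neutral': ['neutral'],
--     'distressed': ['anger', 'disgust', 'fear', 'sadness', 'remorse']
-- }
--
-- def map_to_behavioral_state(row):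
--     """Map emotion columns to behavioral state"""
--     scores = {
--         0: 0,  # calm
--         1: 0,  # restless
--         2: 0,  # stressed
--         3: 0,  # low_energy
--         4: 0,  # neutral
--         5: 0   # distressed
--     }
--
--     if row['neutral'] == 1:
--         return 4
--
--     # Check each mapping
--     for emotion in emotion_mapping['calm']:
--         if emotion in row and row[emotion] == 1:
--             scores[0] += 1
--
--     for emotion in emotion_mapping['restless']:
--         if emotion in row and row[emotion] == 1:
--             scores[1] += 1
--
--     for emotion in emotion_mapping['stressed']:
--         if emotion in row and row[emotion] == 1:
--             scores[2] += 1
--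
--     for emotion in emotion_mapping['low_energy']:
--         if emotion in row and row[emotion] == 1:
--             scores[3] += 1
--
--     for emotion in emotion_mapping['distressed']:
--         if emotion in row and row[emotion] == 1:
--             scores[5] += 1
--
--     # Return state with highest score
--     max_state = max(scores, key=scores.get)
--     return max_state if scores[max_state] > 0 else 4
-- ===== SOURCE B (Python) =====
-- # Single-pass re-implementation: a reverse index from each emotion to the
-- # behavioral-state indices it feeds, then one scan over the row.
-- _REVERSE_INDEX = {
--     'relief': [0], 'approval': [0], 'realization': [0], 'optimism': [0],
--     'caring': [0], 'gratitude': [0],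
--     'nervousness': [1, 2], 'confusion': [1], 'curiosity': [1], 'surprise': [1],
--     'fear': [2, 5], 'annoyance': [2], 'disappointment': [2, 3],
--     'sadness': [3, 5], 'grief': [3], 'embarrassment': [3],
--     'anger': [5], 'disgust': [5], 'remorse': [5],
-- }
--
-- def map_to_behavioral_state(row):
--     """Map emotion columns to behavioral state"""
--     if row['neutral'] == 1:
--         return 4
--     scores = [0, 0, 0, 0, 0, 0]
--     for emotion, value in row.items():
--         if value == 1:
--             for state in _REVERSE_INDEX.get(emotion, []):
--                 scores[state] += 1
--     best = max(range(6), key=scores.__getitem__)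
--     return best if scores[best] > 0 else 4
-- ===== Notes on version B (the rewrite author's own statement) =====
-- stated objective: alternative
-- what changed: Replaces the five hard-coded per-state scans over emotion_mapping (each doing a dict membership test plus lookup) with a single pass over row.items() driven by a precomputed reverse index emotion -> list of state indices, accumulating into a 6-slot score array.
import Mathlib
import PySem

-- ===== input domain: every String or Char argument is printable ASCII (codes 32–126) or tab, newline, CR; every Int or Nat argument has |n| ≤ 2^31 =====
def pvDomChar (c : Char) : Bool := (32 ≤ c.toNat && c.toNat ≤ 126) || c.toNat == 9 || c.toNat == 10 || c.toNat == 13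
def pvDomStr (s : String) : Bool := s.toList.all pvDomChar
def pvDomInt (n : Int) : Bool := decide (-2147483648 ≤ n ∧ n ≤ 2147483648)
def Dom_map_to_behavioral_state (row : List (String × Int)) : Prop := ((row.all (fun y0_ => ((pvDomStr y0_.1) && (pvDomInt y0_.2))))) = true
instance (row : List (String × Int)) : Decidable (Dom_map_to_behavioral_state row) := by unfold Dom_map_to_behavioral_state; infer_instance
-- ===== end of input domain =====

-- B replaces A's five hard-coded per-state scans of emotion_mapping with one pass over the
-- row driven by a precomputed reverse index (emotion -> state indices); same return value.

-- ===== PORT A =====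
-- emotion_mapping's five scored categories ('neutral' is handled by the early return)
def pvEmoCalm : List String := ["relief","approval","realization","optimism","caring","gratitude"]
def pvEmoRestless : List String := ["nervousness","confusion","curiosity","surprise"]
def pvEmoStressed : List String := ["fear","nervousness","annoyance","disappointment"]
def pvEmoLow : List String := ["sadness","grief","disappointment","embarrassment"]
def pvEmoDistressed : List String := ["anger","disgust","fear","sadness","remorse"]

def map_to_behavioral_state (row : List (String × Int)) : Int :=
  let d := PySem.Dict.mk row
  let scores : PySem.Dict Int Int := PySem.Dict.mk [(0,0),(1,0),(2,0),(3,0),(4,0),(5,0)]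
  -- row['neutral'] raises KeyError when the key is absent: excluded by Pre_ (getD is exact under it)
  if d.getD "neutral" 0 == 1 then 4
  else
    let scores := pvEmoCalm.foldl (fun s e => if d.contains e && (d.getD e 0 == 1) then s.modify 0 0 (· + 1) else s) scores
    let scores := pvEmoRestless.foldl (fun s e => if d.contains e && (d.getD e 0 == 1) then s.modify 1 0 (· + 1) else s) scores
    let scores := pvEmoStressed.foldl (fun s e => if d.contains e && (d.getD e 0 == 1) then s.modify 2 0 (· + 1) else s) scores
    let scores := pvEmoLow.foldl (fun s e => if d.contains e && (d.getD e 0 == 1) then s.modify 3 0 (· + 1) else s) scores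
    let scores := pvEmoDistressed.foldl (fun s e => if d.contains e && (d.getD e 0 == 1) then s.modify 5 0 (· + 1) else s) scores
    match PySem.List.max? scores.keys (fun k => scores.getD k 0) with
    | some m => if scores.getD m 0 > 0 then m else 4
    | none => 4

-- ===== PORT B =====
-- reverse index: emotion -> behavioral-state indices it feeds (a dict literal)
def pvRevIndex : PySem.Dict String (List Int) := PySem.Dict.mk
  [("relief",[0]),("approval",[0]),("realization",[0]),("optimism",[0]),("caring",[0]),("gratitude",[0]),
   ("nervousness",[1,2]),("confusion",[1]),("curiosity",[1]),("surprise",[1]),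
   ("fear",[2,5]),("annoyance",[2]),("disappointment",[2,3]),
   ("sadness",[3,5]),("grief",[3]),("embarrassment",[3]),
   ("anger",[5]),("disgust",[5]),("remorse",[5])]

def map_to_behavioral_state_alt (row : List (String × Int)) : Int :=
  let d := PySem.Dict.mk row
  if d.getD "neutral" 0 == 1 then 4
  else
    let scores : List Int := [0, 0, 0, 0, 0, 0]
    let scores := row.foldl (fun s p =>
      if p.2 == 1 then
        (pvRevIndex.getD p.1 []).foldl (fun s' st => PySem.List.pySetD s' st (PySem.List.pyGetD s' st 0 + 1)) s
      else s) scores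
    match PySem.List.max? (PySem.List.pyRange 0 6 1) (fun i => PySem.List.pyGetD scores i 0) with
    | some b => if PySem.List.pyGetD scores b 0 > 0 then b else 4
    | none => 4

-- ===== PRECONDITION & SPEC =====
-- Pre_ excludes rows without a 'neutral' key (A raises KeyError there) and association lists
-- with duplicate keys, which no Python dict can present (lookup-vs-iteration order there is an
-- artefact of the list encoding, not of either program).
def Pre_map_to_behavioral_state (row : List (String × Int)) : Prop :=
  (PySem.Dict.mk row).contains "neutral" = true ∧ (row.map Prod.fst).Nodup
instance (row : List (String × Int)) : Decidable (Pre_map_to_behavioral_state row) := by unfold Pre_map_to_behavioral_state; infer_instance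
def pvWitness_map_to_behavioral_state : (List (String × Int)) := [("neutral", 0), ("fear", 1)]
def Spec_map_to_behavioral_state (row : List (String × Int)) (out : Int) : Prop := out = map_to_behavioral_state_alt row
instance (row : List (String × Int)) (out : Int) : Decidable (Spec_map_to_behavioral_state row out) := by unfold Spec_map_to_behavioral_state; infer_instance

-- ===== CLAIM (what is proved, stated in full; the proofs are below) =====
def Claim_equal_map_to_behavioral_state : Prop := ∀ (row : List (String × Int)), Dom_map_to_behavioral_state row → Pre_map_to_behavioral_state row → Spec_map_to_behavioral_state row (map_to_behavioral_state row)

-- ===== LEMMAS AND PROOFS =====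

-- ---- A-side: each category loop only bumps its own key ----

theorem pv_foldA_getD (L : List String) (Q : String → Bool) (k j : Int) :
    ∀ (s : PySem.Dict Int Int),
    (L.foldl (fun s e => if Q e then s.modify k 0 (· + 1) else s) s).getD j 0
      = s.getD j 0 + if j = k then (L.countP Q : Int) else 0 := by
  induction L with
  | nil => intro s; simp
  | cons e t ih =>
      intro s
      simp only [List.foldl_cons, List.countP_cons]
      by_cases hq : Q e
      · rw [ih, if_pos hq, PySem.Dict.getD_modify]
        by_cases hj : j = k <;> simp [hq, hj] <;> omega
      · rw [ih, if_neg hq]; simp [hq]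

theorem pv_foldA_contains (L : List String) (Q : String → Bool) (k j : Int) :
    ∀ (s : PySem.Dict Int Int), s.contains j = true →
    (L.foldl (fun s e => if Q e then s.modify k 0 (· + 1) else s) s).contains j = true := by
  induction L with
  | nil => intro s h; simpa using h
  | cons e t ih =>
      intro s h
      simp only [List.foldl_cons]
      by_cases hq : Q e
      · exact ih _ (by rw [if_pos hq, PySem.Dict.contains_modify]; simp [h])
      · rw [if_neg hq]; exact ih _ h

theorem pv_foldA_keys (L : List String) (Q : String → Bool) (k : Int) :
    ∀ (s : PySem.Dict Int Int), s.contains k = true →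
    (L.foldl (fun s e => if Q e then s.modify k 0 (· + 1) else s) s).keys = s.keys := by
  induction L with
  | nil => intro s _; rfl
  | cons e t ih =>
      intro s h
      simp only [List.foldl_cons]
      by_cases hq : Q e
      · rw [if_pos hq, ih _ (by rw [PySem.Dict.contains_modify]; simp [h]),
            PySem.Dict.keys_modify, PySem.Dict.keys_insert_of_contains _ _ h]
      · rw [if_neg hq]; exact ih _ h

-- ---- reverse-index bookkeeping ----

theorem pv_ridx_facts (e : String) :
    (∀ st ∈ pvRevIndex.getD e [], 0 ≤ st ∧ st < 6) ∧ (pvRevIndex.getD e []).Nodup := by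
  rcases h : pvRevIndex.get? e with _ | L
  · rw [PySem.Dict.getD_eq_get?_getD, h]; exact ⟨by simp, by simp⟩
  · rw [PySem.Dict.getD_eq_get?_getD, h]
    have hm := PySem.Dict.mem_items_of_get?_eq_some _ h
    simp only [pvRevIndex, List.mem_cons, List.not_mem_nil, or_false] at hm
    rcases hm with h'|h'|h'|h'|h'|h'|h'|h'|h'|h'|h'|h'|h'|h'|h'|h'|h'|h'|h' <;>
      (rw [Prod.mk.injEq] at h'; rcases h' with ⟨-, rfl⟩) <;> exact ⟨by decide, by decide⟩

theorem pv_ridx_mem (e : String) :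
    (((0:Int) ∈ pvRevIndex.getD e []) ↔ e ∈ pvEmoCalm) ∧
    (((1:Int) ∈ pvRevIndex.getD e []) ↔ e ∈ pvEmoRestless) ∧
    (((2:Int) ∈ pvRevIndex.getD e []) ↔ e ∈ pvEmoStressed) ∧
    (((3:Int) ∈ pvRevIndex.getD e []) ↔ e ∈ pvEmoLow) ∧
    (((5:Int) ∈ pvRevIndex.getD e []) ↔ e ∈ pvEmoDistressed) ∧
    ¬ ((4:Int) ∈ pvRevIndex.getD e []) := by
  rcases h : pvRevIndex.get? e with _ | L
  · have hk : e ∉ pvRevIndex.keys := (PySem.Dict.get?_eq_none_iff_not_mem_keys _ _).mp h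
    rw [PySem.Dict.getD_eq_get?_getD, h]
    simp only [pvRevIndex, PySem.Dict.keys, List.map_cons, List.map_nil, List.mem_cons,
      List.not_mem_nil, or_false, not_or] at hk
    obtain ⟨n1,n2,n3,n4,n5,n6,n7,n8,n9,n10,n11,n12,n13,n14,n15,n16,n17,n18,n19⟩ := hk
    simp [pvEmoCalm, pvEmoRestless, pvEmoStressed, pvEmoLow, pvEmoDistressed,
      n1,n2,n3,n4,n5,n6,n7,n8,n9,n10,n11,n12,n13,n14,n15,n16,n17,n18,n19]
  · rw [PySem.Dict.getD_eq_get?_getD, h]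
    have hm := PySem.Dict.mem_items_of_get?_eq_some _ h
    simp only [pvRevIndex, List.mem_cons, List.not_mem_nil, or_false] at hm
    rcases hm with h'|h'|h'|h'|h'|h'|h'|h'|h'|h'|h'|h'|h'|h'|h'|h'|h'|h'|h' <;>
      (rw [Prod.mk.injEq] at h'; rcases h' with ⟨rfl, rfl⟩) <;> exact ⟨by decide, by decide, by decide, by decide, by decide, by decide⟩

-- ---- B-side: the inner bump loop adds the multiplicity of each index ----

theorem pv_bump (L : List Int) :
    ∀ (s : List Int), s.length = 6 → (∀ st ∈ L, 0 ≤ st ∧ st < 6) →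
    ((L.foldl (fun s' st => PySem.List.pySetD s' st (PySem.List.pyGetD s' st 0 + 1)) s).length = 6 ∧
     ∀ j : Int, 0 ≤ j → j < 6 →
      PySem.List.pyGetD (L.foldl (fun s' st => PySem.List.pySetD s' st (PySem.List.pyGetD s' st 0 + 1)) s) j 0
        = PySem.List.pyGetD s j 0 + (L.count j : Int)) := by
  induction L with
  | nil => intro s hs _; exact ⟨hs, by simp⟩
  | cons a t ih =>
      intro s hs hL
      have ha := hL a (by simp)
      have hlen1 : (PySem.List.pySetD s a (PySem.List.pyGetD s a 0 + 1)).length = 6 := by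
        rw [PySem.List.length_pySetD]; exact hs
      obtain ⟨hlen, hget⟩ := ih _ hlen1 (fun st hst => hL st (by simp [hst]))
      refine ⟨by simpa using hlen, ?_⟩
      intro j hj0 hj6
      simp only [List.foldl_cons]
      rw [hget j hj0 hj6, List.count_cons]
      rw [PySem.List.pySetD_of_nonneg s _ ha.1,
          PySem.List.pyGetD_of_nonneg _ (0:Int) hj0,
          PySem.List.pyGetD_of_nonneg s (0:Int) hj0,
          PySem.List.pyGetD_of_nonneg s (0:Int) ha.1]
      by_cases hja : j = a
      · subst hja
        have hlt : j.toNat < s.length := by omega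
        simp only [List.getD_eq_getElem?_getD, List.getElem?_set, if_pos hlt,
          Option.getD_some, beq_self_eq_true, if_pos]
        have : s[j.toNat]?.getD 0 = s.getD j.toNat 0 := by rw [List.getD_eq_getElem?_getD]
        push_cast
        ring
      · have hne : a.toNat ≠ j.toNat := by omega
        have hbe : (a == j) = false := by simpa using hja ∘ Eq.symm
        simp [List.getD_eq_getElem?_getD, List.getElem?_set, if_neg hne, hbe]

-- ---- B-side: one pass over the row counts, per state, the matching row entries ----

theorem pv_rowfold (row : List (String × Int)) :
    ∀ (s : List Int), s.length = 6 →
    ((row.foldl (fun s p =>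
        if p.2 == 1 then
          (pvRevIndex.getD p.1 []).foldl (fun s' st => PySem.List.pySetD s' st (PySem.List.pyGetD s' st 0 + 1)) s
        else s) s).length = 6 ∧
     ∀ j : Int, 0 ≤ j → j < 6 →
      PySem.List.pyGetD (row.foldl (fun s p =>
        if p.2 == 1 then
          (pvRevIndex.getD p.1 []).foldl (fun s' st => PySem.List.pySetD s' st (PySem.List.pyGetD s' st 0 + 1)) s
        else s) s) j 0
        = PySem.List.pyGetD s j 0
          + (row.countP (fun p => p.2 == 1 && decide (j ∈ pvRevIndex.getD p.1 [])) : Int)) := by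
  induction row with
  | nil => intro s hs; exact ⟨hs, by simp⟩
  | cons q t ih =>
      intro s hs
      by_cases hq : (q.2 == 1) = true
      · obtain ⟨hbl, hbg⟩ := pv_bump (pvRevIndex.getD q.1 []) s hs (pv_ridx_facts q.1).1
        obtain ⟨hlen, hget⟩ := ih _ hbl
        constructor
        · simpa only [List.foldl_cons, if_pos hq] using hlen
        · intro j hj0 hj6
          simp only [List.foldl_cons, if_pos hq, List.countP_cons]
          rw [hget j hj0 hj6, hbg j hj0 hj6]
          have hcnt : ((pvRevIndex.getD q.1 []).count j : Int)
              = if (q.2 == 1 && decide (j ∈ pvRevIndex.getD q.1 [])) = true then 1 else 0 := by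
            by_cases hmem : j ∈ pvRevIndex.getD q.1 []
            · rw [List.count_eq_one_of_mem (pv_ridx_facts q.1).2 hmem]; simp [hq, hmem]
            · rw [List.count_eq_zero.mpr hmem]; simp [hmem]
          rw [hcnt]
          push_cast
          split_ifs <;> ring
      · obtain ⟨hlen, hget⟩ := ih s hs
        constructor
        · simpa only [List.foldl_cons, if_neg hq] using hlen
        · intro j hj0 hj6
          simp only [List.foldl_cons, if_neg hq, List.countP_cons]
          rw [hget j hj0 hj6]
          simp [hq]

-- ---- counting bridge: row-side counts equal A's category-side counts ----

theorem pv_countP_split (row : List (String × Int)) (e : String) (cat : List String) (he : e ∉ cat) :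
    row.countP (fun p => p.2 == 1 && decide (p.1 ∈ e :: cat))
      = row.countP (fun p => p.2 == 1 && (p.1 == e))
        + row.countP (fun p => p.2 == 1 && decide (p.1 ∈ cat)) := by
  induction row with
  | nil => simp
  | cons q t ih =>
      simp only [List.countP_cons, ih]
      by_cases h1 : q.1 = e <;> by_cases h2 : q.1 ∈ cat <;> by_cases h3 : q.2 = 1 <;>
        simp_all [List.mem_cons] <;> omega

theorem pv_count_single (e : String) :
    ∀ (row : List (String × Int)), (row.map Prod.fst).Nodup →
    row.countP (fun p => p.2 == 1 && (p.1 == e))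
      = if ((PySem.Dict.mk row).contains e && ((PySem.Dict.mk row).getD e 0 == 1)) = true then 1 else 0 := by
  intro row
  induction row with
  | nil => intro _; simp [PySem.Dict.contains_mk]
  | cons q t ih =>
      intro hnd
      have hnd2 : (q.1 :: t.map Prod.fst).Nodup := by simpa using hnd
      have hnd' : (t.map Prod.fst).Nodup := hnd2.of_cons
      simp only [List.countP_cons]
      by_cases h1 : q.1 = e
      · have hnotin : e ∉ t.map Prod.fst := h1 ▸ (List.nodup_cons.mp hnd2).1
        have hzero : t.countP (fun p => p.2 == 1 && (p.1 == e)) = 0 := by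
          rw [List.countP_eq_zero]
          intro p hp
          have : p.1 ≠ e := fun hpe => hnotin (hpe ▸ List.mem_map_of_mem hp)
          simp [this]
        rw [hzero]
        have hcontains : (PySem.Dict.mk (q :: t)).contains e = true := by
          rw [PySem.Dict.contains_mk]; simp [h1]
        have hget : (PySem.Dict.mk (q :: t)).getD e 0 = q.2 := by
          rw [PySem.Dict.getD_eq_get?_getD]
          rw [show (PySem.Dict.mk (q :: t)) = PySem.Dict.mk ((q.1, q.2) :: t) by simp]
          rw [PySem.Dict.get?_mk_cons]
          simp [h1]
        rw [hcontains, hget]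
        by_cases h2 : q.2 = 1 <;> simp [h1, h2]
      · have hcontains : (PySem.Dict.mk (q :: t)).contains e = (PySem.Dict.mk t).contains e := by
          rw [PySem.Dict.contains_mk, PySem.Dict.contains_mk]
          simp [List.any_cons, h1]
        have hget : (PySem.Dict.mk (q :: t)).getD e 0 = (PySem.Dict.mk t).getD e 0 := by
          rw [PySem.Dict.getD_eq_get?_getD, PySem.Dict.getD_eq_get?_getD]
          rw [show (PySem.Dict.mk (q :: t)) = PySem.Dict.mk ((q.1, q.2) :: t) by simp]
          rw [PySem.Dict.get?_mk_cons]
          simp [h1]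
        rw [hcontains, hget, ih hnd']
        simp [h1]

theorem pv_cross (row : List (String × Int)) (hnd : (row.map Prod.fst).Nodup) :
    ∀ (cat : List String), cat.Nodup →
    row.countP (fun p => p.2 == 1 && decide (p.1 ∈ cat))
      = cat.countP (fun e => (PySem.Dict.mk row).contains e && ((PySem.Dict.mk row).getD e 0 == 1)) := by
  intro cat hcat
  induction cat with
  | nil => simp
  | cons e rest ih =>
      have he : e ∉ rest := (List.nodup_cons.mp hcat).1
      rw [pv_countP_split row e rest he, pv_count_single e row hnd, List.countP_cons,
          ih (List.nodup_cons.mp hcat).2]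
      omega

-- ---- selection: max? is insensitive to replacing the key pointwise on the list ----

def pvStepF (f : Int → Int) : Option Int → Int → Option Int := fun acc x =>
  match acc with
  | none => some x
  | some m => if f m < f x then some x else some m

theorem pv_max_aux (f g : Int → Int) :
    ∀ (xs : List Int) (acc : Option Int), (∀ x ∈ xs, f x = g x) → (∀ m, acc = some m → f m = g m) →
    xs.foldl (pvStepF f) acc = xs.foldl (pvStepF g) acc := by
  intro xs
  induction xs with
  | nil => intro acc _ _; rfl
  | cons x t ih =>
      intro acc hx hacc
      have hfx : f x = g x := hx x (by simp)
      rcases acc with _ | m0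
      · simp only [List.foldl_cons, pvStepF]
        refine ih (some x) (fun y hy => hx y (by simp [hy])) ?_
        intro m hm; injection hm with hm; subst hm; exact hfx
      · simp only [List.foldl_cons, pvStepF]
        rw [hacc m0 rfl, hfx]
        refine ih _ (fun y hy => hx y (by simp [hy])) ?_
        intro m hm
        split at hm <;> injection hm with hm <;> subst hm
        · exact hfx
        · exact hacc _ rfl

theorem pv_max?_eq_fold (xs : List Int) (f : Int → Int) :
    PySem.List.max? xs f = xs.foldl (pvStepF f) none := by
  unfold PySem.List.max?
  congr 1
  funext acc x
  rcases acc <;> rfl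

theorem pv_max?_congr (xs : List Int) (f g : Int → Int) (h : ∀ x ∈ xs, f x = g x) :
    PySem.List.max? xs f = PySem.List.max? xs g := by
  rw [pv_max?_eq_fold, pv_max?_eq_fold]
  exact pv_max_aux f g xs none h (by intro m hm; cases hm)


-- ---- composite A-side evaluation ----

theorem pv_T0_getD (j : Int) : (PySem.Dict.mk [((0:Int),(0:Int)),(1,0),(2,0),(3,0),(4,0),(5,0)]).getD j 0 = 0 := by
  rcases h : (PySem.Dict.mk [((0:Int),(0:Int)),(1,0),(2,0),(3,0),(4,0),(5,0)]).get? j with _ | v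
  · rw [PySem.Dict.getD_eq_get?_getD, h]; rfl
  · have hm := PySem.Dict.mem_items_of_get?_eq_some _ h
    rw [PySem.Dict.getD_eq_get?_getD, h]
    simp only [List.mem_cons, List.not_mem_nil, or_false] at hm
    rcases hm with h'|h'|h'|h'|h'|h' <;> (rw [Prod.mk.injEq] at h'; rcases h' with ⟨-, rfl⟩) <;> rfl

theorem pv_A_keys_eval (Q : String → Bool) :
    ((pvEmoDistressed.foldl (fun s e => if Q e then s.modify 5 0 (· + 1) else s)
      (pvEmoLow.foldl (fun s e => if Q e then s.modify 3 0 (· + 1) else s)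
      (pvEmoStressed.foldl (fun s e => if Q e then s.modify 2 0 (· + 1) else s)
      (pvEmoRestless.foldl (fun s e => if Q e then s.modify 1 0 (· + 1) else s)
      (pvEmoCalm.foldl (fun s e => if Q e then s.modify 0 0 (· + 1) else s)
      (PySem.Dict.mk [((0:Int),(0:Int)),(1,0),(2,0),(3,0),(4,0),(5,0)]))))))).keys = [0, 1, 2, 3, 4, 5] := by
  rw [pv_foldA_keys pvEmoDistressed Q 5 _ (pv_foldA_contains pvEmoLow Q 3 5 _ (pv_foldA_contains pvEmoStressed Q 2 5 _ (pv_foldA_contains pvEmoRestless Q 1 5 _ (pv_foldA_contains pvEmoCalm Q 0 5 _ (by decide : (PySem.Dict.mk [((0:Int),(0:Int)),(1,0),(2,0),(3,0),(4,0),(5,0)]).contains (5:Int) = true))))),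
      pv_foldA_keys pvEmoLow Q 3 _ (pv_foldA_contains pvEmoStressed Q 2 3 _ (pv_foldA_contains pvEmoRestless Q 1 3 _ (pv_foldA_contains pvEmoCalm Q 0 3 _ (by decide : (PySem.Dict.mk [((0:Int),(0:Int)),(1,0),(2,0),(3,0),(4,0),(5,0)]).contains (3:Int) = true)))),
      pv_foldA_keys pvEmoStressed Q 2 _ (pv_foldA_contains pvEmoRestless Q 1 2 _ (pv_foldA_contains pvEmoCalm Q 0 2 _ (by decide : (PySem.Dict.mk [((0:Int),(0:Int)),(1,0),(2,0),(3,0),(4,0),(5,0)]).contains (2:Int) = true))),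
      pv_foldA_keys pvEmoRestless Q 1 _ (pv_foldA_contains pvEmoCalm Q 0 1 _ (by decide : (PySem.Dict.mk [((0:Int),(0:Int)),(1,0),(2,0),(3,0),(4,0),(5,0)]).contains (1:Int) = true)),
      pv_foldA_keys pvEmoCalm Q 0 _ (by decide : (PySem.Dict.mk [((0:Int),(0:Int)),(1,0),(2,0),(3,0),(4,0),(5,0)]).contains (0:Int) = true)]
  decide

theorem pv_A_getD_eval (Q : String → Bool) (j : Int) :
    ((pvEmoDistressed.foldl (fun s e => if Q e then s.modify 5 0 (· + 1) else s)
      (pvEmoLow.foldl (fun s e => if Q e then s.modify 3 0 (· + 1) else s)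
      (pvEmoStressed.foldl (fun s e => if Q e then s.modify 2 0 (· + 1) else s)
      (pvEmoRestless.foldl (fun s e => if Q e then s.modify 1 0 (· + 1) else s)
      (pvEmoCalm.foldl (fun s e => if Q e then s.modify 0 0 (· + 1) else s)
      (PySem.Dict.mk [((0:Int),(0:Int)),(1,0),(2,0),(3,0),(4,0),(5,0)]))))))).getD j 0
      = (if j = 0 then (pvEmoCalm.countP Q : Int) else 0)
        + (if j = 1 then (pvEmoRestless.countP Q : Int) else 0)
        + (if j = 2 then (pvEmoStressed.countP Q : Int) else 0)
        + (if j = 3 then (pvEmoLow.countP Q : Int) else 0)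
        + (if j = 5 then (pvEmoDistressed.countP Q : Int) else 0) := by
  rw [pv_foldA_getD, pv_foldA_getD, pv_foldA_getD, pv_foldA_getD, pv_foldA_getD, pv_T0_getD]
  ring

-- ---- the counting bridge, per state ----

theorem pv_bridge (row : List (String × Int)) (hnd : (row.map Prod.fst).Nodup) :
    (row.countP (fun p => p.2 == 1 && decide ((0:Int) ∈ pvRevIndex.getD p.1 []))
       = pvEmoCalm.countP (fun e => (PySem.Dict.mk row).contains e && ((PySem.Dict.mk row).getD e 0 == 1))) ∧
    (row.countP (fun p => p.2 == 1 && decide ((1:Int) ∈ pvRevIndex.getD p.1 []))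
       = pvEmoRestless.countP (fun e => (PySem.Dict.mk row).contains e && ((PySem.Dict.mk row).getD e 0 == 1))) ∧
    (row.countP (fun p => p.2 == 1 && decide ((2:Int) ∈ pvRevIndex.getD p.1 []))
       = pvEmoStressed.countP (fun e => (PySem.Dict.mk row).contains e && ((PySem.Dict.mk row).getD e 0 == 1))) ∧
    (row.countP (fun p => p.2 == 1 && decide ((3:Int) ∈ pvRevIndex.getD p.1 []))
       = pvEmoLow.countP (fun e => (PySem.Dict.mk row).contains e && ((PySem.Dict.mk row).getD e 0 == 1))) ∧
    (row.countP (fun p => p.2 == 1 && decide ((5:Int) ∈ pvRevIndex.getD p.1 []))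
       = pvEmoDistressed.countP (fun e => (PySem.Dict.mk row).contains e && ((PySem.Dict.mk row).getD e 0 == 1))) ∧
    (row.countP (fun p => p.2 == 1 && decide ((4:Int) ∈ pvRevIndex.getD p.1 [])) = 0) := by
  refine ⟨?_, ?_, ?_, ?_, ?_, ?_⟩
  · have hc : row.countP (fun p : String × Int => p.2 == 1 && decide ((0:Int) ∈ pvRevIndex.getD p.1 []))
        = row.countP (fun p : String × Int => p.2 == 1 && decide (p.1 ∈ pvEmoCalm)) :=
      List.countP_congr (fun p _ => by simp only [Bool.and_eq_true, decide_eq_true_eq, (pv_ridx_mem p.1).1])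
    rw [hc, pv_cross row hnd pvEmoCalm (by decide)]
  · have hc : row.countP (fun p : String × Int => p.2 == 1 && decide ((1:Int) ∈ pvRevIndex.getD p.1 []))
        = row.countP (fun p : String × Int => p.2 == 1 && decide (p.1 ∈ pvEmoRestless)) :=
      List.countP_congr (fun p _ => by simp only [Bool.and_eq_true, decide_eq_true_eq, (pv_ridx_mem p.1).2.1])
    rw [hc, pv_cross row hnd pvEmoRestless (by decide)]
  · have hc : row.countP (fun p : String × Int => p.2 == 1 && decide ((2:Int) ∈ pvRevIndex.getD p.1 []))
        = row.countP (fun p : String × Int => p.2 == 1 && decide (p.1 ∈ pvEmoStressed)) :=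
      List.countP_congr (fun p _ => by simp only [Bool.and_eq_true, decide_eq_true_eq, (pv_ridx_mem p.1).2.2.1])
    rw [hc, pv_cross row hnd pvEmoStressed (by decide)]
  · have hc : row.countP (fun p : String × Int => p.2 == 1 && decide ((3:Int) ∈ pvRevIndex.getD p.1 []))
        = row.countP (fun p : String × Int => p.2 == 1 && decide (p.1 ∈ pvEmoLow)) :=
      List.countP_congr (fun p _ => by simp only [Bool.and_eq_true, decide_eq_true_eq, (pv_ridx_mem p.1).2.2.2.1])
    rw [hc, pv_cross row hnd pvEmoLow (by decide)]
  · have hc : row.countP (fun p : String × Int => p.2 == 1 && decide ((5:Int) ∈ pvRevIndex.getD p.1 []))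
        = row.countP (fun p : String × Int => p.2 == 1 && decide (p.1 ∈ pvEmoDistressed)) :=
      List.countP_congr (fun p _ => by simp only [Bool.and_eq_true, decide_eq_true_eq, (pv_ridx_mem p.1).2.2.2.2.1])
    rw [hc, pv_cross row hnd pvEmoDistressed (by decide)]
  · rw [List.countP_eq_zero]
    intro p _
    simp [(pv_ridx_mem p.1).2.2.2.2.2]

theorem pv_B_getD_eval (row : List (String × Int)) (j : Int) (h0 : 0 ≤ j) (h6 : j < 6) :
    PySem.List.pyGetD (row.foldl (fun s p =>
      if p.2 == 1 then
        (pvRevIndex.getD p.1 []).foldl (fun s' st => PySem.List.pySetD s' st (PySem.List.pyGetD s' st 0 + 1)) s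
      else s) [0, 0, 0, 0, 0, 0]) j 0
      = (row.countP (fun p => p.2 == 1 && decide (j ∈ pvRevIndex.getD p.1 [])) : Int) := by
  obtain ⟨-, hget⟩ := pv_rowfold row [0, 0, 0, 0, 0, 0] (by decide)
  rw [hget j h0 h6]
  have hz : PySem.List.pyGetD ([0, 0, 0, 0, 0, 0] : List Int) j 0 = 0 := by
    have : j = 0 ∨ j = 1 ∨ j = 2 ∨ j = 3 ∨ j = 4 ∨ j = 5 := by omega
    rcases this with rfl|rfl|rfl|rfl|rfl|rfl <;> decide
  rw [hz, zero_add]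

-- ---- main equivalence ----

theorem pv_main : ∀ (row : List (String × Int)), Dom_map_to_behavioral_state row → Pre_map_to_behavioral_state row → map_to_behavioral_state row = map_to_behavioral_state_alt row := by
  intro row _ hP
  obtain ⟨hneu, hnd⟩ := hP
  unfold map_to_behavioral_state map_to_behavioral_state_alt
  by_cases hn : ((PySem.Dict.mk row).getD "neutral" 0 == 1) = true
  · simp only [hn, if_true]
  · simp only [hn]
    set SA : PySem.Dict Int Int :=
      (pvEmoDistressed.foldl (fun s e => if (PySem.Dict.mk row).contains e && ((PySem.Dict.mk row).getD e 0 == 1) then s.modify 5 0 (· + 1) else s)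
      (pvEmoLow.foldl (fun s e => if (PySem.Dict.mk row).contains e && ((PySem.Dict.mk row).getD e 0 == 1) then s.modify 3 0 (· + 1) else s)
      (pvEmoStressed.foldl (fun s e => if (PySem.Dict.mk row).contains e && ((PySem.Dict.mk row).getD e 0 == 1) then s.modify 2 0 (· + 1) else s)
      (pvEmoRestless.foldl (fun s e => if (PySem.Dict.mk row).contains e && ((PySem.Dict.mk row).getD e 0 == 1) then s.modify 1 0 (· + 1) else s)
      (pvEmoCalm.foldl (fun s e => if (PySem.Dict.mk row).contains e && ((PySem.Dict.mk row).getD e 0 == 1) then s.modify 0 0 (· + 1) else s)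
      (PySem.Dict.mk [((0:Int),(0:Int)),(1,0),(2,0),(3,0),(4,0),(5,0)])))))) with hSA
    set SB : List Int := row.foldl (fun s p =>
      if p.2 == 1 then
        (pvRevIndex.getD p.1 []).foldl (fun s' st => PySem.List.pySetD s' st (PySem.List.pyGetD s' st 0 + 1)) s
      else s) [0, 0, 0, 0, 0, 0] with hSB
    have hpt : ∀ x ∈ ([0, 1, 2, 3, 4, 5] : List Int), SA.getD x 0 = PySem.List.pyGetD SB x 0 := by
      intro x hx
      obtain ⟨b0, b1, b2, b3, b5, b4⟩ := pv_bridge row hnd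
      fin_cases hx <;>
        rw [hSA, hSB, pv_A_getD_eval, pv_B_getD_eval row _ (by norm_num) (by norm_num)] <;>
        simp only [b0, b1, b2, b3, b4, b5] <;> norm_num
    have hkeys : SA.keys = [0, 1, 2, 3, 4, 5] := by rw [hSA]; exact pv_A_keys_eval _
    have hr : PySem.List.pyRange 0 6 1 = ([0, 1, 2, 3, 4, 5] : List Int) := by decide
    rw [hkeys, hr, pv_max?_congr ([0, 1, 2, 3, 4, 5] : List Int) (fun k => SA.getD k 0) (fun i => PySem.List.pyGetD SB i 0) hpt]
    rcases hM : PySem.List.max? ([0, 1, 2, 3, 4, 5] : List Int) (fun i => PySem.List.pyGetD SB i 0) with _ | m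
    · rfl
    · have hm6 : m ∈ ([0, 1, 2, 3, 4, 5] : List Int) := PySem.List.max?_mem hM
      show (if SA.getD m 0 > 0 then m else 4) = (if PySem.List.pyGetD SB m 0 > 0 then m else 4)
      rw [hpt m hm6]

-- ===== VERDICT (by name: the statement is the Claim_ definition above) =====
theorem map_to_behavioral_state_spec : Claim_equal_map_to_behavioral_state := by
  intro row hD hP
  unfold Spec_map_to_behavioral_state
  exact pv_main row hD hP
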